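-- pv_equiv track=rewrite | github.com/nileshsahu2307/LCA-Tool-eufsi | backend/server.py | _normalize_activity_code
-- ===== SOURCE A (Python) =====
-- def _normalize_activity_code(name: str) -> str:
--     """Normalize activity name to a valid code"""
--     if not name:
--         return ""
--     # Remove commas, parentheses, and normalize spaces/dashes to underscores
--     code = name.lower()
--     code = code.replace(",", "").replace("(", "").replace(")", "")
--     # Handle " - " specially to avoid double underscores
--     code = code.replace(" - ", "_")
--     code = code.replace(" ", "_")
--     code = code.replace("-", "_")
--     # Remove double underscores
--     while "__" in code:
--         code = code.replace("__", "_")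
--     return code.strip("_")
-- ===== SOURCE B (Python) =====
-- def _normalize_activity_code(name: str) -> str:
--     """Normalize activity name to a valid code (single-pass version)."""
--     if not name:
--         return ""
--     out = []
--     prev = ""
--     for ch in name.lower():
--         if ch == "," or ch == "(" or ch == ")":
--             continue
--         if ch == " " or ch == "-" or ch == "_":
--             if prev == "_":
--                 continue
--             ch = "_"
--         out.append(ch)
--         prev = ch
--     return "".join(out).strip("_")
-- ===== Notes on version B (the rewrite author's own statement) =====
-- stated objective: simpler
-- what changed: Replaced A's six sequential str.replace passes plus a while-loop that repeatedly rescans the whole string to collapse double underscores with a single stateful pass over the lowercased string that skips commas and parentheses and emits an underscore for space, dash or underscore only when the previously emitted character was not already an underscore.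
import Mathlib
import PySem

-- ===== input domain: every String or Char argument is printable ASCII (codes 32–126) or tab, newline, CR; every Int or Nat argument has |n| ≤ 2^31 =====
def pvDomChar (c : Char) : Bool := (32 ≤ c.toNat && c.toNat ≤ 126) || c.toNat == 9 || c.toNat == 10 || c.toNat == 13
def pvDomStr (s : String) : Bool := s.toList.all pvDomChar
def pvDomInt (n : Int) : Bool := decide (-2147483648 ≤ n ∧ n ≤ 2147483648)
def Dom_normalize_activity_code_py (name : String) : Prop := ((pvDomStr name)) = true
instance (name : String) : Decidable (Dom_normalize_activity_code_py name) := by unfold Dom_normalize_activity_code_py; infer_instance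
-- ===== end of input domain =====

-- B replaces A's replace-chain + while-loop double-underscore collapse with one stateful pass over the
-- lowercased string tracking the last emitted character (objective: simpler single traversal).

-- ===== PORT A =====
-- A-side helper: the `while "__" in code: code = code.replace("__", "_")` loop, with a fuel bound
-- (each pass strictly shortens the string, so `length code` passes always reach the fixed point;
-- proved below in pvCollapse_eq / pvRep_len_lt)
def pvCollapse : Nat → String → String
  | 0, code => code
  | f + 1, code =>
    if PySem.Str.isIn "__" code then pvCollapse f (PySem.Str.replace code "__" "_") else code

def normalize_activity_code_py (name : String) : String :=
  if name = "" then ""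
  else
    let code := PySem.Str.lower name
    let code := PySem.Str.replace code "," ""
    let code := PySem.Str.replace code "(" ""
    let code := PySem.Str.replace code ")" ""
    let code := PySem.Str.replace code " - " "_"
    let code := PySem.Str.replace code " " "_"
    let code := PySem.Str.replace code "-" "_"
    let code := pvCollapse code.toList.length code
    PySem.Str.stripChars code "_"

-- ===== PORT B =====
-- B-side helper: one step of B's loop; state = (out so far, prev = last emitted char as a 0/1-char string)
def pvAltStep (st : List Char × List Char) (ch : Char) : List Char × List Char :=
  if ch = ',' ∨ ch = '(' ∨ ch = ')' then st
  else if ch = ' ' ∨ ch = '-' ∨ ch = '_' then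
    (if st.2 = ['_'] then st else (st.1 ++ ['_'], ['_']))
  else (st.1 ++ [ch], [ch])

def normalize_activity_code_py_alt (name : String) : String :=
  if name = "" then ""
  else
    let st := ((PySem.Str.lower name).toList).foldl pvAltStep ([], [])
    PySem.Str.stripChars (String.ofList st.1) "_"

-- ===== PRECONDITION & SPEC =====
def Spec_normalize_activity_code_py (name : String) (out : String) : Prop := out = normalize_activity_code_py_alt name
instance (name : String) (out : String) : Decidable (Spec_normalize_activity_code_py name out) := by unfold Spec_normalize_activity_code_py; infer_instance

-- ===== CLAIM (what is proved, stated in full; the proofs are below) =====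
def Claim_equal_normalize_activity_code_py : Prop := ∀ (name : String), Dom_normalize_activity_code_py name → Spec_normalize_activity_code_py name (normalize_activity_code_py name)

-- ===== LEMMAS AND PROOFS =====

-- a structural form of Python str.replace for a nonempty pattern
def pvRep (o : Char) (os new : List Char) : List Char → List Char
  | [] => []
  | c :: t =>
    if (o :: os).isPrefixOf (c :: t) then new ++ pvRep o os new (t.drop os.length)
    else c :: pvRep o os new t
termination_by s => s.length
decreasing_by
  · simp [List.length_drop]
  · simp

theorem pvRep_go (o : Char) (os new : List Char) :
    ∀ (fuel : Nat) (s acc : List Char), s.length ≤ fuel →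
      PySem.Chars.replace.go (o :: os) new fuel s acc = acc.reverse ++ pvRep o os new s := by
  intro fuel
  induction fuel with
  | zero => intro s acc h; simp at h; simp [h, PySem.Chars.replace.go, pvRep]
  | succ f ih =>
    intro s acc h
    cases s with
    | nil => simp [PySem.Chars.replace.go, pvRep]
    | cons c t =>
      rw [PySem.Chars.replace.go, pvRep]
      simp only [List.length_cons] at h
      by_cases hp : (o :: os).isPrefixOf (c :: t) = true
      · have hd : List.drop (o :: os).length (c :: t) = t.drop os.length := by
          simp [List.drop_succ_cons]
        simp only [hp, if_true, hd]
        have hb : (t.drop os.length).length ≤ f := by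
          simp [List.length_drop]; omega
        rw [ih (t.drop os.length) (new.reverse ++ acc) hb]
        simp
      · simp only [hp]
        rw [ih t (c :: acc) (by omega)]
        simp

theorem pvReplace_eq (o : Char) (os new s : List Char) :
    PySem.Chars.replace s (o :: os) new = pvRep o os new s := by
  rw [PySem.Chars.replace]
  simp [pvRep_go o os new s.length s [] (Nat.le_refl _)]

theorem pvRep_len_le (s : List Char) : (pvRep '_' ['_'] ['_'] s).length ≤ s.length := by
  induction s using pvRep.induct '_' ['_'] with
  | case1 => simp [pvRep]
  | case2 c t hp ih => rw [pvRep, if_pos hp]; simp at ih ⊢; omega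
  | case3 c t hp ih => rw [pvRep, if_neg hp]; simp; omega

theorem pvRep_len_lt (s : List Char) :
    ['_', '_'] <:+: s → (pvRep '_' ['_'] ['_'] s).length < s.length := by
  induction s using pvRep.induct '_' ['_'] with
  | case1 => intro h; simp at h
  | case2 c t hp _ =>
    intro _
    obtain ⟨r, hr⟩ := List.isPrefixOf_iff_prefix.mp hp
    cases hr
    rw [pvRep, if_pos hp]
    have := pvRep_len_le r
    simp at this ⊢
    omega
  | case3 c t hp ih =>
    intro h
    have hti : ['_', '_'] <:+: t := by
      rcases List.infix_cons_iff.mp h with hpre | hinf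
      · exact absurd (List.isPrefixOf_iff_prefix.mpr hpre) hp
      · exact hinf
    have := ih hti
    rw [pvRep, if_neg hp]
    simp
    omega

theorem pvCollapse_dec (code : String) (h : PySem.Str.isIn "__" code = true) :
    (PySem.Str.replace code "__" "_").toList.length < code.toList.length := by
  have hinf : ("__".toList) <:+: code.toList := (PySem.Str.isIn_iff_infix "__" code).mp h
  have : "__".toList = ['_', '_'] := rfl
  rw [this] at hinf
  rw [PySem.Str.toList_replace]
  show (PySem.Chars.replace code.toList "__".toList "_".toList).length < _
  rw [this]
  show (PySem.Chars.replace code.toList ['_', '_'] ['_']).length < _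
  rw [pvReplace_eq]
  exact pvRep_len_lt _ hinf

-- canonical middle form: filter out ",()", map space/dash to '_', collapse runs of '_', strip '_'
def pvFilt (cs : List Char) : List Char :=
  cs.filter (fun c => !(c == ',' || c == '(' || c == ')'))

def pvMapSep (cs : List Char) : List Char :=
  cs.map (fun c => if c = ' ' ∨ c = '-' then '_' else c)

def pvSqueeze : List Char → List Char
  | [] => []
  | [c] => [c]
  | a :: b :: t => if a = '_' ∧ b = '_' then pvSqueeze (b :: t) else a :: pvSqueeze (b :: t)

def pvUnder : List Char → List Char
  | [] => []
  | c :: r => if c = '_' then r else c :: r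

-- squeeze structure lemmas
theorem pvSqueeze_cons_ne (c : Char) (x : List Char) (hc : c ≠ '_') :
    pvSqueeze (c :: x) = c :: pvSqueeze x := by
  cases x with
  | nil => rfl
  | cons b t => rw [pvSqueeze]; simp [hc]

theorem pvSqueeze_underscore (x : List Char) :
    pvSqueeze ('_' :: x) = '_' :: pvUnder (pvSqueeze x) := by
  induction x with
  | nil => rfl
  | cons b t ih =>
    by_cases hb : b = '_'
    · subst hb
      rw [pvSqueeze, if_pos (And.intro rfl rfl), ih, pvUnder]
      simp [pvUnder]
    · rw [pvSqueeze]
      simp only [hb, and_false, if_false]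
      rw [pvSqueeze_cons_ne b t hb, pvUnder]
      simp [hb]

theorem pvSqueeze_congr_cons (c : Char) (x y : List Char) (h : pvSqueeze x = pvSqueeze y) :
    pvSqueeze (c :: x) = pvSqueeze (c :: y) := by
  by_cases hc : c = '_'
  · subst hc; rw [pvSqueeze_underscore, pvSqueeze_underscore, h]
  · rw [pvSqueeze_cons_ne c x hc, pvSqueeze_cons_ne c y hc, h]

theorem pvSqueeze_uu (x : List Char) : pvSqueeze ('_' :: '_' :: x) = pvSqueeze ('_' :: x) := by
  rw [pvSqueeze]; simp

-- A's " - " -> "_" pass is invisible after separator-mapping and squeezing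
theorem pvSqueeze_dash (s : List Char) :
    pvSqueeze (pvMapSep (pvRep ' ' ['-', ' '] ['_'] s)) = pvSqueeze (pvMapSep s) := by
  induction s using pvRep.induct ' ' ['-', ' '] with
  | case1 => rw [pvRep]
  | case2 c t hp ih =>
    obtain ⟨r, hr⟩ := List.isPrefixOf_iff_prefix.mp hp
    cases hr
    rw [pvRep, if_pos hp]
    simp only [List.append_eq, List.cons_append, List.nil_append, List.length_cons,
      List.length_nil, List.drop_succ_cons, List.drop_zero] at ih ⊢
    simp only [pvMapSep, List.map_cons]
    norm_num
    rw [pvSqueeze_uu, pvSqueeze_uu]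
    exact pvSqueeze_congr_cons '_' _ _ (by simpa [pvMapSep] using ih)
  | case3 c t hp ih =>
    rw [pvRep, if_neg hp]
    simp only [pvMapSep, List.map_cons]
    exact pvSqueeze_congr_cons _ _ _ (by simpa [pvMapSep] using ih)

-- one "__" -> "_" replace pass is invisible under squeeze
theorem pvSqueeze_rep (s : List Char) :
    pvSqueeze (pvRep '_' ['_'] ['_'] s) = pvSqueeze s := by
  induction s using pvRep.induct '_' ['_'] with
  | case1 => rw [pvRep]
  | case2 c t hp ih =>
    obtain ⟨r, hr⟩ := List.isPrefixOf_iff_prefix.mp hp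
    cases hr
    rw [pvRep, if_pos hp]
    simp only [List.append_eq, List.cons_append, List.nil_append, List.length_cons,
      List.length_nil, List.drop_succ_cons, List.drop_zero] at ih ⊢
    rw [pvSqueeze_uu]
    exact pvSqueeze_congr_cons '_' _ _ ih
  | case3 c t hp ih =>
    rw [pvRep, if_neg hp]
    exact pvSqueeze_congr_cons c _ _ ih

-- a string with no "__" is already squeezed
theorem pvSqueeze_of_no_doubles (s : List Char) (h : ¬ ['_', '_'] <:+: s) : pvSqueeze s = s := by
  induction s using pvSqueeze.induct with
  | case1 => rfl
  | case2 c => rfl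
  | case3 a b t hab ih =>
    obtain ⟨ha, hb⟩ := hab
    subst ha hb
    exact absurd (show ['_', '_'] <:+: '_' :: '_' :: t from ⟨[], t, rfl⟩) h
  | case4 a b t hab ih =>
    rw [pvSqueeze, if_neg hab, ih (fun hi => h (List.infix_cons hi))]

-- the while loop computes pvSqueeze once the fuel covers the string length
theorem pvCollapse_eq : ∀ (fuel : Nat) (code : String), code.toList.length ≤ fuel →
    (pvCollapse fuel code).toList = pvSqueeze code.toList := by
  intro fuel
  induction fuel with
  | zero =>
    intro code h
    have h0 : code.toList = [] := List.eq_nil_of_length_eq_zero (Nat.le_zero.mp h)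
    rw [pvCollapse, h0]
    rfl
  | succ f ih =>
    intro code h
    rw [pvCollapse]
    by_cases hin : PySem.Str.isIn "__" code = true
    · rw [if_pos hin]
      have hlt := pvCollapse_dec code hin
      rw [ih _ (by omega)]
      have h1 : (PySem.Str.replace code "__" "_").toList
          = pvRep '_' ['_'] ['_'] code.toList := by
        rw [PySem.Str.toList_replace]
        show PySem.Chars.replace code.toList ['_', '_'] ['_'] = _
        exact pvReplace_eq _ _ _ _
      rw [h1, pvSqueeze_rep]
    · rw [if_neg hin]
      have : ¬ ['_', '_'] <:+: code.toList := by
        intro hi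
        exact hin ((PySem.Str.isIn_iff_infix "__" code).mpr hi)
      exact (pvSqueeze_of_no_doubles _ this).symm

-- a one-step unfolding of pvRep for a single-character pattern
theorem pvRep1_cons (a : Char) (new : List Char) (c : Char) (t : List Char) :
    pvRep a [] new (c :: t) = if c = a then new ++ pvRep a [] new t else c :: pvRep a [] new t := by
  rw [pvRep]
  by_cases h : c = a
  · subst h; simp [List.isPrefixOf]
  · have hb : (a == c) = false := beq_eq_false_iff_ne.mpr (fun hh => h hh.symm)
    simp [List.isPrefixOf, hb, h]

-- B's fold in terms of pvG
def pvG : Bool → List Char → List Char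
  | _, [] => []
  | b, c :: t =>
    if c = ',' ∨ c = '(' ∨ c = ')' then pvG b t
    else if c = ' ' ∨ c = '-' ∨ c = '_' then (if b then pvG true t else '_' :: pvG true t)
    else c :: pvG false t

theorem pvFold_eq (cs : List Char) : ∀ (out prev : List Char),
    (cs.foldl pvAltStep (out, prev)).1 = out ++ pvG (prev == ['_']) cs := by
  induction cs with
  | nil => intro out prev; simp [pvG]
  | cons c t ih =>
    intro out prev
    rw [List.foldl_cons]
    by_cases h0 : c = ',' ∨ c = '(' ∨ c = ')'
    · rw [show pvAltStep (out, prev) c = (out, prev) from by simp [pvAltStep, h0], ih, pvG]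
      simp [h0]
    · by_cases h1 : c = ' ' ∨ c = '-' ∨ c = '_'
      · by_cases h2 : prev = ['_']
        · subst h2
          rw [show pvAltStep (out, ['_']) c = (out, ['_']) from by simp [pvAltStep, h0, h1], ih, pvG]
          simp [h0, h1]
        · rw [show pvAltStep (out, prev) c = (out ++ ['_'], ['_']) from by
              simp [pvAltStep, h0, h1, h2], ih, pvG]
          have hb : (prev == ['_']) = false := beq_eq_false_iff_ne.mpr h2
          simp [h0, h1, hb]
      · rw [show pvAltStep (out, prev) c = (out ++ [c], [c]) from by simp [pvAltStep, h0, h1],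
            ih, pvG]
        have hc : c ≠ '_' := fun hc => h1 (Or.inr (Or.inr hc))
        have hb : ([c] == ['_']) = false := by simpa using hc
        simp [h0, h1, hb]

theorem pvG_eq (cs : List Char) :
    pvG false cs = pvSqueeze (pvMapSep (pvFilt cs)) ∧
      pvG true cs = pvUnder (pvSqueeze (pvMapSep (pvFilt cs))) := by
  induction cs with
  | nil => exact ⟨rfl, rfl⟩
  | cons c t ih =>
    obtain ⟨ihf, iht⟩ := ih
    by_cases h0 : c = ',' ∨ c = '(' ∨ c = ')'
    · have hf : pvFilt (c :: t) = pvFilt t := by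
        rcases h0 with h | h | h <;> subst h <;> simp [pvFilt]
      rw [pvG, pvG, hf]
      simp [h0, ihf, iht]
    · have hf : pvFilt (c :: t) = c :: pvFilt t := by
        simp only [pvFilt, List.filter_cons]
        have : (!(c == ',' || c == '(' || c == ')')) = true := by
          simp only [Bool.not_eq_eq_eq_not, Bool.not_true, Bool.or_eq_false_iff, beq_eq_false_iff_ne]
          exact ⟨⟨fun h => h0 (Or.inl h), fun h => h0 (Or.inr (Or.inl h))⟩,
            fun h => h0 (Or.inr (Or.inr h))⟩
        rw [this]
        simp
      by_cases h1 : c = ' ' ∨ c = '-' ∨ c = '_'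
      · have hm : pvMapSep (c :: pvFilt t) = '_' :: pvMapSep (pvFilt t) := by
          rcases h1 with h | h | h <;> subst h <;> simp [pvMapSep]
        rw [pvG, pvG, hf, hm, pvSqueeze_underscore]
        constructor
        · simp [h0, h1, iht]
        · simp [h0, h1, iht, pvUnder]
      · have hc : c ≠ '_' := fun hc => h1 (Or.inr (Or.inr hc))
        have hm : pvMapSep (c :: pvFilt t) = c :: pvMapSep (pvFilt t) := by
          have : ¬ (c = ' ' ∨ c = '-') := fun h => h1 (h.elim Or.inl (Or.inr ∘ Or.inl))
          simp [pvMapSep, this]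
        rw [pvG, pvG, hf, hm, pvSqueeze_cons_ne c _ hc]
        constructor
        · simp [h0, h1, ihf]
        · show pvG true (c :: t) = pvUnder (c :: pvSqueeze (pvMapSep (pvFilt t)))
          rw [pvG, if_neg h0, if_neg h1, ihf, pvUnder, if_neg hc]

-- the replace chain in canonical form
theorem pvChain_filt (s : List Char) :
    pvRep ')' [] [] (pvRep '(' [] [] (pvRep ',' [] [] s)) = pvFilt s := by
  induction s with
  | nil => simp [pvRep, pvFilt]
  | cons c t ih =>
    rw [pvRep1_cons]
    by_cases h1 : c = ','
    · subst h1; rw [if_pos rfl]; simpa [pvFilt] using ih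
    · rw [if_neg h1, pvRep1_cons]
      by_cases h2 : c = '('
      · subst h2; rw [if_pos rfl]; simpa [pvFilt] using ih
      · rw [if_neg h2, pvRep1_cons]
        by_cases h3 : c = ')'
        · subst h3; rw [if_pos rfl]; simpa [pvFilt] using ih
        · rw [if_neg h3, ih]
          have : (!(c == ',' || c == '(' || c == ')')) = true := by
            simp only [Bool.not_eq_eq_eq_not, Bool.not_true, Bool.or_eq_false_iff,
              beq_eq_false_iff_ne]
            exact ⟨⟨h1, h2⟩, h3⟩
          simp only [pvFilt, List.filter_cons, this]
          simp

theorem pvChain_map (s : List Char) :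
    pvRep '-' [] ['_'] (pvRep ' ' [] ['_'] s) = pvMapSep s := by
  induction s with
  | nil => simp [pvRep, pvMapSep]
  | cons c t ih =>
    rw [pvRep1_cons]
    by_cases h1 : c = ' '
    · subst h1
      rw [if_pos rfl, List.singleton_append, pvRep1_cons, if_neg (by decide), ih]
      simp [pvMapSep]
    · rw [if_neg h1, pvRep1_cons]
      by_cases h2 : c = '-'
      · subst h2
        rw [if_pos rfl, List.singleton_append, ih]
        simp [pvMapSep]
      · rw [if_neg h2, ih]
        have : ¬ (c = ' ' ∨ c = '-') := fun h => h.elim h1 h2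
        simp [pvMapSep, this]

-- ===== VERDICT (by name: the statement is the Claim_ definition above) =====
theorem pvStrRep (s : String) (o : Char) (os new : List Char) (old nw : String)
    (h1 : old.toList = o :: os) (h2 : nw.toList = new) :
    (PySem.Str.replace s old nw).toList = pvRep o os new s.toList := by
  rw [PySem.Str.toList_replace, h1, h2, pvReplace_eq]

theorem normalize_activity_code_py_spec : Claim_equal_normalize_activity_code_py := by
  intro name _
  show normalize_activity_code_py name = normalize_activity_code_py_alt name
  by_cases hn : name = ""
  · rw [normalize_activity_code_py, normalize_activity_code_py_alt, if_pos hn, if_pos hn]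
  · simp only [normalize_activity_code_py, normalize_activity_code_py_alt, if_neg hn]
    apply String.toList_inj.mp
    rw [PySem.Str.toList_stripChars, PySem.Str.toList_stripChars]
    rw [pvCollapse_eq _ _ (Nat.le_refl _)]
    rw [pvStrRep _ '-' [] ['_'] "-" "_" rfl rfl,
        pvStrRep _ ' ' [] ['_'] " " "_" rfl rfl,
        pvStrRep _ ' ' ['-', ' '] ['_'] " - " "_" rfl rfl,
        pvStrRep _ ')' [] [] ")" "" rfl rfl,
        pvStrRep _ '(' [] [] "(" "" rfl rfl,
        pvStrRep _ ',' [] [] "," "" rfl rfl]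
    rw [pvChain_map, pvChain_filt, pvSqueeze_dash]
    rw [pvFold_eq _ [] []]
    rw [show (([] : List Char) == ['_']) = false from rfl]
    rw [(pvG_eq _).1]
    simp
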